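-- pv_equiv track=rewrite | github.com/DrRivaski/Baekjoon | 프로그래머스/3/152995. 인사고과/인사고과.py | solution
-- ===== SOURCE A (Python) =====
-- def solution(scores):
--     wanho = scores[0]
--     wanho_work_score = wanho[0]
--     wanho_company_score = wanho[1]
--
--     sorted_scores = sorted(scores, key=lambda x: (-x[0], x[1]))
--
--
--     max_company_score = 0
--     rank = 0
--     for score in sorted_scores:
--         if wanho_work_score < score[0] and wanho_company_score < score[1]:
--             return -1
--
--
--         if score[1] >= max_company_score:
--             max_company_score = score[1]
--             if score[0] + score[1] > wanho_work_score + wanho_company_score: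
--                 rank += 1
--
--
--
--     return rank + 1
-- ===== SOURCE B (Python) =====
-- def solution(scores):
--     w, c = scores[0]
--     if any(y[0] > w and y[1] > c for y in scores):
--         return -1
--     return 1 + sum(1 for x in scores
--                    if x[0] + x[1] > w + c
--                    and not any(y[0] > x[0] and y[1] > x[1] for y in scores))
-- ===== Notes on version B (the rewrite author's own statement) =====
-- stated objective: alternative
-- what changed: Replaces A's sort-then-sweep with a running company-score maximum by a sort-free quadratic algorithm: return -1 if anyone strictly dominates wanho, else 1 plus the count of employees whose total beats wanho's and whom nobody strictly dominates (pairwise dominance test instead of sorting).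
-- intended difference: On lists where wanho is undominated but some undominated employee with a negative company score beats wanho's total, A's max_company_score=0 initialization silently skips that employee and A returns a too-small rank, while B counts every undominated total-beater, the intended rank. — e.g. on solution([(0, 0), (5, -1)]): A returns 1, B returns 2
import Mathlib
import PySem

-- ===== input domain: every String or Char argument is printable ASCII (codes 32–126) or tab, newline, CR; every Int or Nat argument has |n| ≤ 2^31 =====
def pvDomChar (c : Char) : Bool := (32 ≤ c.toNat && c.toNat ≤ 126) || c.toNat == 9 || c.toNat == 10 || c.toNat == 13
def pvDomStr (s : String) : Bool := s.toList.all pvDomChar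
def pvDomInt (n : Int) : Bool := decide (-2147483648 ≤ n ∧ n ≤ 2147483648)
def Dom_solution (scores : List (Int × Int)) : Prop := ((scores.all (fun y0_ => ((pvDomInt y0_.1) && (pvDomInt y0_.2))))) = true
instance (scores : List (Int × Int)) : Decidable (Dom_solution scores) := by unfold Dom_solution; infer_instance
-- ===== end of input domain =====

-- B replaces A's sort + running-max sweep by a sort-free pairwise-dominance count (an
-- alternative decomposition, not claimed faster); A's max_company_score=0 start makes it
-- undercount undominated employees with a negative company score — stated as D_ below.

-- ===== PORT A =====
-- the fused for-loop of A: early return -1, running max_company_score, rank counter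
def aLoop (ww wc : Int) : List (Int × Int) → Int → Int → Int
  | [], _, rank => rank + 1
  | s :: rest, maxc, rank =>
    if ww < s.1 ∧ wc < s.2 then -1
    else if s.2 ≥ maxc then
      aLoop ww wc rest s.2 (if s.1 + s.2 > ww + wc then rank + 1 else rank)
    else
      aLoop ww wc rest maxc rank

def solution (scores : List (Int × Int)) : Int :=
  match PySem.List.pyGet? scores 0 with
  | none => 0   -- scores[0] raises IndexError in Python; excluded by Pre_solution
  | some wanho =>
    aLoop wanho.1 wanho.2
      (PySem.List.sorted2 scores (fun x => -x.1) (fun x => x.2)) 0 0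

-- ===== PORT B =====
def solution_alt (scores : List (Int × Int)) : Int :=
  match scores with
  | [] => 0   -- scores[0] raises IndexError in Python; excluded by Pre_solution
  | (w, c) :: _ =>
    if scores.any (fun y => decide (y.1 > w) && decide (y.2 > c)) then -1
    else 1 + ((scores.filter (fun x =>
        decide (x.1 + x.2 > w + c) &&
        !(scores.any (fun y => decide (y.1 > x.1) && decide (y.2 > x.2))))).length : Int)

-- ===== PRECONDITION & SPEC =====
-- Pre_ excludes only the empty list, on which A raises IndexError (scores[0]).
def Pre_solution (scores : List (Int × Int)) : Prop := scores ≠ []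
instance (scores : List (Int × Int)) : Decidable (Pre_solution scores) := by unfold Pre_solution; infer_instance
def pvWitness_solution : (List (Int × Int)) := [(1, 1)]

-- On lists where wanho is undominated but some undominated employee with a negative company
-- score beats wanho's total, A's max_company_score = 0 start skips that employee and returns a
-- too-small rank; B counts every undominated total-beater, the intended rank.
def D_solution (scores : List (Int × Int)) : Prop :=
  scores ≠ [] ∧
  (∀ y ∈ scores, ¬(y.1 > scores.headI.1 ∧ y.2 > scores.headI.2)) ∧
  ∃ x ∈ scores, x.2 < 0 ∧ x.1 + x.2 > scores.headI.1 + scores.headI.2 ∧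
    ∀ y ∈ scores, ¬(y.1 > x.1 ∧ y.2 > x.2)
instance (scores : List (Int × Int)) : Decidable (D_solution scores) := by unfold D_solution; infer_instance

def Spec_solution (scores : List (Int × Int)) (out : Int) : Prop := ¬ D_solution scores → out = solution_alt scores
instance (scores : List (Int × Int)) (out : Int) : Decidable (Spec_solution scores out) := by unfold Spec_solution; infer_instance

def pvDiffWitness_solution : (List (Int × Int)) := [(0, 0), (5, -1)]
def pvDiffWitnessOut_solution : Int × Int := (1, 2)

-- ===== CLAIM (what is proved, stated in full; the proofs are below) =====
def Claim_unchanged_solution : Prop := ∀ (scores : List (Int × Int)), Dom_solution scores → Pre_solution scores → Spec_solution scores (solution scores)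
def Claim_changed_solution : Prop := Dom_solution (pvDiffWitness_solution) ∧ Pre_solution (pvDiffWitness_solution) ∧ D_solution (pvDiffWitness_solution) ∧ solution (pvDiffWitness_solution) = pvDiffWitnessOut_solution.1 ∧ solution_alt (pvDiffWitness_solution) = pvDiffWitnessOut_solution.2 ∧ pvDiffWitnessOut_solution.1 ≠ pvDiffWitnessOut_solution.2
def Claim_exact_solution : Prop := ∀ (scores : List (Int × Int)), Dom_solution scores → Pre_solution scores → D_solution scores → solution scores ≠ solution_alt scores

-- ===== LEMMAS AND PROOFS =====

-- the lexicographic "not after" order of A's sort key (-x[0], x[1])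
def LexLe (a b : Int × Int) : Prop := b.1 < a.1 ∨ (a.1 = b.1 ∧ a.2 ≤ b.2)

def bef (a b : Int × Int) : Bool :=
  decide ((-a.1) < (-b.1)) || (!decide ((-b.1) < (-a.1)) && decide (a.2 < b.2))

theorem sorted2_eq (scores : List (Int × Int)) :
    PySem.List.sorted2 scores (fun x => -x.1) (fun x => x.2)
      = scores.foldl (fun acc x => PySem.List.insertBy bef x acc) [] := rfl

theorem lexle_trans {a b c : Int × Int} (h1 : LexLe a b) (h2 : LexLe b c) : LexLe a c := by
  unfold LexLe at *; omega

theorem pairwise_insertBy (x : Int × Int) (l : List (Int × Int)) (h : l.Pairwise LexLe) :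
    (PySem.List.insertBy bef x l).Pairwise LexLe := by
  induction l with
  | nil => simp [PySem.List.insertBy]
  | cons y ys ih =>
    rcases List.pairwise_cons.mp h with ⟨hy, hys⟩
    simp only [PySem.List.insertBy]
    by_cases hb : bef x y = true
    · simp only [hb, if_true]
      have hxy : LexLe x y := by
        unfold bef at hb
        simp only [Bool.or_eq_true, Bool.and_eq_true, Bool.not_eq_true',
          decide_eq_true_eq, decide_eq_false_iff_not] at hb
        unfold LexLe; omega
      refine List.pairwise_cons.mpr ⟨?_, h⟩
      intro z hz
      rcases List.mem_cons.mp hz with rfl | hz'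
      · exact hxy
      · exact lexle_trans hxy (hy z hz')
    · simp only [hb, if_false]
      refine List.pairwise_cons.mpr ⟨?_, ih hys⟩
      intro z hz
      rcases (PySem.List.mem_insertBy _ _ _ _).mp hz with rfl | hz'
      · unfold bef at hb
        simp only [Bool.or_eq_true, Bool.and_eq_true, Bool.not_eq_true',
          decide_eq_true_eq, decide_eq_false_iff_not] at hb
        push_neg at hb
        unfold LexLe; omega
      · exact hy z hz'

theorem pairwise_foldl_insertBy (xs : List (Int × Int)) :
    ∀ acc, acc.Pairwise LexLe →
      (xs.foldl (fun acc x => PySem.List.insertBy bef x acc) acc).Pairwise LexLe := by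
  induction xs with
  | nil => intro acc h; simpa using h
  | cons x t ih => intro acc h; exact ih _ (pairwise_insertBy x acc h)

theorem sorted2_pairwise (scores : List (Int × Int)) :
    (PySem.List.sorted2 scores (fun x => -x.1) (fun x => x.2)).Pairwise LexLe := by
  rw [sorted2_eq]; exact pairwise_foldl_insertBy scores [] (by simp)

-- A's count as a structural function (proof helper)
def cnt (ww wc : Int) : List (Int × Int) → Int → Int
  | [], _ => 0
  | x :: rest, m =>
    if x.2 ≥ m then (if x.1 + x.2 > ww + wc then 1 else 0) + cnt ww wc rest x.2
    else cnt ww wc rest m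

theorem aLoop_neg (ww wc : Int) (l : List (Int × Int)) :
    ∀ m r, (∃ x ∈ l, ww < x.1 ∧ wc < x.2) → aLoop ww wc l m r = -1 := by
  induction l with
  | nil => intro m r h; simp at h
  | cons a t ih =>
    intro m r h
    rcases h with ⟨x, hx, hd⟩
    simp only [aLoop]
    by_cases hda : ww < a.1 ∧ wc < a.2
    · simp [hda]
    · have hxt : x ∈ t := by
        rcases List.mem_cons.mp hx with h1 | h1
        · exact absurd (h1 ▸ hd) hda
        · exact h1
      split_ifs with _ h2 <;> first
        | exact absurd (by assumption) hda
        | exact ih _ _ ⟨x, hxt, hd⟩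

theorem aLoop_pos (ww wc : Int) (l : List (Int × Int)) :
    ∀ m r, (∀ x ∈ l, ¬(ww < x.1 ∧ wc < x.2)) →
      aLoop ww wc l m r = r + 1 + cnt ww wc l m := by
  induction l with
  | nil => intro m r _; simp [aLoop, cnt]
  | cons a t ih =>
    intro m r h
    have ha := h a (List.mem_cons_self)
    have ht : ∀ x ∈ t, ¬(ww < x.1 ∧ wc < x.2) := fun x hx => h x (List.mem_cons_of_mem _ hx)
    simp only [aLoop, cnt, if_neg ha]
    by_cases h2 : a.2 ≥ m
    · simp only [if_pos h2, ih _ _ ht]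
      by_cases h3 : a.1 + a.2 > ww + wc <;> simp [h3] <;> omega
    · simp only [if_neg h2, ih _ _ ht]

-- running maximum of company scores, starting (like A) at 0
def mx (pre : List (Int × Int)) : Int := pre.foldl (fun m y => max m y.2) 0

theorem mx_append (pre : List (Int × Int)) (x : Int × Int) :
    mx (pre ++ [x]) = max (mx pre) x.2 := by
  unfold mx; rw [List.foldl_append]; rfl

theorem zero_le_mx (pre : List (Int × Int)) : 0 ≤ mx pre := by
  unfold mx
  exact (PySem.List.le_foldl_max_int pre (fun y => y.2) 0).1

theorem le_mx (pre : List (Int × Int)) : ∀ y ∈ pre, y.2 ≤ mx pre := by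
  unfold mx
  exact (PySem.List.le_foldl_max_int pre (fun y => y.2) 0).2

theorem mx_le (pre : List (Int × Int)) (b : Int) (h0 : 0 ≤ b) (h : ∀ y ∈ pre, y.2 ≤ b) :
    mx pre ≤ b := by
  unfold mx
  have : ∀ (init : Int), init ≤ b → pre.foldl (fun m y => max m y.2) init ≤ b := by
    induction pre with
    | nil => intro init hi; simpa using hi
    | cons a t ih =>
      intro init hi
      simp only [List.foldl_cons]
      exact ih (fun y hy => h y (List.mem_cons_of_mem _ hy)) _
        (max_le hi (h a List.mem_cons_self))
  exact this 0 h0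

-- the counted predicate of A, over the full original list L
def PA (ww wc : Int) (L : List (Int × Int)) (x : Int × Int) : Bool :=
  decide (0 ≤ x.2) &&
  !(L.any (fun y => decide (y.1 > x.1) && decide (y.2 > x.2))) &&
  decide (x.1 + x.2 > ww + wc)

-- B's counted predicate
def PB (ww wc : Int) (L : List (Int × Int)) (x : Int × Int) : Bool :=
  decide (x.1 + x.2 > ww + wc) &&
  !(L.any (fun y => decide (y.1 > x.1) && decide (y.2 > x.2)))

theorem cnt_char (ww wc : Int) (L S : List (Int × Int)) (hp : S.Perm L)
    (hpw : S.Pairwise LexLe) :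
    ∀ l pre, pre ++ l = S → cnt ww wc l (mx pre) = ((l.countP (PA ww wc L) : Nat) : Int) := by
  intro l
  induction l with
  | nil => intro pre _; simp [cnt]
  | cons x t ih =>
    intro pre hs
    have hpw' : (pre ++ x :: t).Pairwise LexLe := hs ▸ hpw
    rcases List.pairwise_append.mp hpw' with ⟨hpre, hxt, hcross⟩
    have hxts := List.pairwise_cons.mp hxt
    -- key characterisation: x survives A's running max iff 0 ≤ x.2 and x is undominated in L
    have hkey : mx pre ≤ x.2 ↔
        (0 ≤ x.2 ∧ ∀ y ∈ L, ¬(y.1 > x.1 ∧ y.2 > x.2)) := by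
      constructor
      · intro hm
        refine ⟨le_trans (zero_le_mx pre) hm, ?_⟩
        intro y hy hd
        have hyS : y ∈ S := hp.symm.subset hy
        rw [← hs] at hyS
        rcases List.mem_append.mp hyS with hyp | hyc
        · exact absurd (le_trans (le_mx pre y hyp) hm) (by omega)
        · rcases List.mem_cons.mp hyc with rfl | hyt
          · omega
          · have := hxts.1 y hyt
            unfold LexLe at this; omega
      · rintro ⟨h0, hnd⟩
        refine mx_le pre x.2 h0 ?_
        intro y hyp
        have hyL : y ∈ L := hp.subset (hs ▸ List.mem_append_left _ hyp)
        have hlx := hcross y hyp x List.mem_cons_self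
        unfold LexLe at hlx
        have := hnd y hyL
        omega
    have hmx' : mx (pre ++ [x]) = max (mx pre) x.2 := mx_append pre x
    have hs' : (pre ++ [x]) ++ t = S := by simpa using hs
    simp only [cnt, List.countP_cons]
    by_cases hm : x.2 ≥ mx pre
    · have hPA : PA ww wc L x =
          decide (x.1 + x.2 > ww + wc) := by
        rcases hkey.mp hm with ⟨h0, hnd⟩
        unfold PA
        have : (L.any fun y => decide (y.1 > x.1) && decide (y.2 > x.2)) = false := by
          simp only [List.any_eq_false, Bool.and_eq_true, decide_eq_true_eq, not_and]
          intro y hy h1 h2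
          exact hnd y hy ⟨h1, h2⟩
        simp [this, h0]
      have hrec := ih (pre ++ [x]) hs'
      rw [hmx', max_eq_right hm] at hrec
      simp only [if_pos hm, hrec, hPA]
      by_cases hg : x.1 + x.2 > ww + wc <;> simp [hg] <;> omega
    · have hPA : PA ww wc L x = false := by
        have : ¬(0 ≤ x.2 ∧ ∀ y ∈ L, ¬(y.1 > x.1 ∧ y.2 > x.2)) := fun hc => hm (hkey.mpr hc)
        unfold PA
        by_cases h0 : 0 ≤ x.2
        · have hnd' := not_and.mp this h0
          push_neg at hnd'
          rcases hnd' with ⟨y, hy, h1, h2⟩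
          have : (L.any fun y => decide (y.1 > x.1) && decide (y.2 > x.2)) = true :=
            List.any_eq_true.mpr ⟨y, hy, by simp [h1, h2]⟩
          simp [this]
        · simp [h0]
      have hrec := ih (pre ++ [x]) hs'
      rw [hmx', max_eq_left (by omega)] at hrec
      simp only [if_neg hm, hrec, hPA]
      simp

theorem countP_lt (p q : (Int × Int) → Bool) (l : List (Int × Int))
    (hmono : ∀ a ∈ l, p a = true → q a = true)
    (hw : ∃ a ∈ l, p a = false ∧ q a = true) :
    l.countP p < l.countP q := by
  induction l with
  | nil => simp at hw
  | cons a t ih =>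
    have hmt : ∀ b ∈ t, p b = true → q b = true :=
      fun b hb => hmono b (List.mem_cons_of_mem _ hb)
    have hle : t.countP p ≤ t.countP q := List.countP_mono_left hmt
    rcases hw with ⟨b, hb, hpb, hqb⟩
    simp only [List.countP_cons]
    rcases List.mem_cons.mp hb with heq | hbt
    · subst heq
      simp [hpb, hqb]; omega
    · have hlt := ih hmt ⟨b, hbt, hpb, hqb⟩
      by_cases hpa : p a = true
      · simp [hpa, hmono a List.mem_cons_self hpa]; omega
      · simp only [Bool.not_eq_true] at hpa
        simp [hpa]
        by_cases hqa : q a = true <;> simp [hqa] <;> omega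

-- in the no-dominator branch, A computes 1 + (count of PA over scores)
theorem solution_eq_count (w c : Int) (rest : List (Int × Int))
    (hnd : ∀ y ∈ (w, c) :: rest, ¬(y.1 > w ∧ y.2 > c)) :
    solution ((w, c) :: rest) =
      1 + ((((w, c) :: rest).countP (PA w c ((w, c) :: rest)) : Nat) : Int) := by
  unfold solution
  have hget : PySem.List.pyGet? ((w, c) :: rest) (0 : Int) = some (w, c) := by
    simp [PySem.List.pyGet?, PySem.List.pyIdx?]
  rw [hget]
  show aLoop w c (PySem.List.sorted2 ((w, c) :: rest) (fun x => -x.1) (fun x => x.2)) 0 0 = _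
  set S := PySem.List.sorted2 ((w, c) :: rest) (fun x => -x.1) (fun x => x.2) with hS
  have hperm : S.Perm ((w, c) :: rest) := PySem.List.sorted2_perm _ _ _ _
  have hndS : ∀ x ∈ S, ¬(w < x.1 ∧ c < x.2) := by
    intro x hx hc
    exact hnd x (hperm.subset hx) ⟨hc.1, hc.2⟩
  rw [aLoop_pos w c S 0 0 hndS]
  have h0 : mx ([] : List (Int × Int)) = 0 := rfl
  have := cnt_char w c ((w, c) :: rest) S hperm (sorted2_pairwise _) S [] (by simp)
  rw [h0] at this
  rw [this, hperm.countP_eq]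
  omega

-- B is 1 + (count of PB over scores) in the same branch
theorem solution_alt_eq_count (w c : Int) (rest : List (Int × Int))
    (hnd : ¬((((w, c) :: rest).any fun y => decide (y.1 > w) && decide (y.2 > c)) = true)) :
    solution_alt ((w, c) :: rest) =
      1 + ((((w, c) :: rest).countP (PB w c ((w, c) :: rest)) : Nat) : Int) := by
  unfold solution_alt
  simp only [hnd, if_false, Bool.false_eq_true]
  rw [← List.countP_eq_length_filter]
  rfl

theorem any_dom_iff (w c : Int) (l : List (Int × Int)) :
    ((l.any fun y => decide (y.1 > w) && decide (y.2 > c)) = true) ↔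
      ∃ y ∈ l, y.1 > w ∧ y.2 > c := by
  simp [List.any_eq_true]

-- ===== VERDICT (by name: the statement is the Claim_ definition above) =====
theorem solution_spec : Claim_unchanged_solution := by
  intro scores _ hpre hnd
  match scores, hpre with
  | (w, c) :: rest, _ =>
    unfold Spec_solution at *
    by_cases hany : (((w, c) :: rest).any fun y => decide (y.1 > w) && decide (y.2 > c)) = true
    · -- someone dominates wanho: both sides return -1
      rcases (any_dom_iff w c _).mp hany with ⟨y, hy, hd⟩
      have hAv : solution ((w, c) :: rest) = -1 := by
        unfold solution
        have hget : PySem.List.pyGet? ((w, c) :: rest) (0 : Int) = some (w, c) := by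
          simp [PySem.List.pyGet?, PySem.List.pyIdx?]
        rw [hget]
        show aLoop w c (PySem.List.sorted2 ((w, c) :: rest) (fun x => -x.1) (fun x => x.2)) 0 0 = -1
        exact aLoop_neg w c _ 0 0
          ⟨y, (PySem.List.sorted2_perm _ _ _ _).symm.subset hy, hd.1, hd.2⟩
      have hBv : solution_alt ((w, c) :: rest) = -1 := by
        unfold solution_alt; simp [hany]
      rw [hAv, hBv]
    · have hndL : ∀ y ∈ (w, c) :: rest, ¬(y.1 > w ∧ y.2 > c) := by
        intro y hy hc
        exact hany ((any_dom_iff w c _).mpr ⟨y, hy, hc⟩)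
      rw [solution_eq_count w c rest hndL, solution_alt_eq_count w c rest hany]
      -- outside D_, every undominated total-beater has a nonnegative company score
      have hnoneg : ∀ x ∈ (w, c) :: rest,
          x.1 + x.2 > w + c →
          (∀ y ∈ (w, c) :: rest, ¬(y.1 > x.1 ∧ y.2 > x.2)) → 0 ≤ x.2 := by
        intro x hx hg hund
        by_contra hneg
        exact hnd ⟨List.cons_ne_nil _ _, by simpa using hndL,
          ⟨x, hx, by omega, by simpa using hg, hund⟩⟩
      have : (((w, c) :: rest).countP (PA w c ((w, c) :: rest)))
          = (((w, c) :: rest).countP (PB w c ((w, c) :: rest))) := by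
        apply List.countP_congr
        intro x hx
        unfold PA PB
        by_cases hg : x.1 + x.2 > w + c
        · by_cases hdom : ((((w, c) :: rest).any
              fun y => decide (y.1 > x.1) && decide (y.2 > x.2)) = true)
          · simp [hg, hdom]
          · have hund : ∀ y ∈ (w, c) :: rest, ¬(y.1 > x.1 ∧ y.2 > x.2) := by
              intro y hy hc
              exact hdom (List.any_eq_true.mpr ⟨y, hy, by simp [hc.1, hc.2]⟩)
            have h0 := hnoneg x hx hg hund
            simp only [Bool.not_eq_true] at hdom
            simp [hg, hdom, h0]
        · simp [hg]
      rw [this]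

theorem solution_changed : Claim_changed_solution := by
  unfold Claim_changed_solution; decide

theorem solution_tight : Claim_exact_solution := by
  intro scores _ hpre hd
  match scores, hpre with
  | (w, c) :: rest, _ =>
    rcases hd with ⟨_, hndh, x, hx, hneg, hg, hund⟩
    simp only [List.headI] at hndh hg
    have hndL : ∀ y ∈ (w, c) :: rest, ¬(y.1 > w ∧ y.2 > c) := by simpa using hndh
    have hany : ¬((((w, c) :: rest).any fun y => decide (y.1 > w) && decide (y.2 > c)) = true) := by
      intro h
      rcases (any_dom_iff w c _).mp h with ⟨y, hy, hdd⟩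
      exact hndL y hy hdd
    rw [solution_eq_count w c rest hndL, solution_alt_eq_count w c rest hany]
    have hlt : (((w, c) :: rest).countP (PA w c ((w, c) :: rest)))
        < (((w, c) :: rest).countP (PB w c ((w, c) :: rest))) := by
      apply countP_lt
      · intro a _ hpa
        unfold PA at hpa; unfold PB
        simp only [Bool.and_eq_true] at hpa ⊢
        exact ⟨hpa.2, hpa.1.2⟩
      · refine ⟨x, hx, ?_, ?_⟩
        · unfold PA
          simp only [Bool.and_eq_false_iff]
          left; left; simp; omega
        · unfold PB
          have : (((w, c) :: rest).any fun y => decide (y.1 > x.1) && decide (y.2 > x.2)) = false := by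
            simp only [List.any_eq_false, Bool.and_eq_true, decide_eq_true_eq, not_and]
            intro y hy h1 h2
            exact hund y hy ⟨h1, h2⟩
          simp [this]; omega
    omega
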